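-- pv_equiv track=rewrite | github.com/xvanov/rental-management | scripts/smud/scraper.py | _has_address_pattern
-- ===== SOURCE A (Python) =====
-- def _has_address_pattern(text: str) -> bool:
--     """Check if text contains what looks like a street address."""
--     street_suffixes = [
--         ' ST', ' AVE', ' DR', ' CT', ' RD', ' LN', ' WAY', ' BLVD', ' CIR',
--         ' STREET', ' AVENUE', ' DRIVE', ' COURT', ' ROAD', ' LANE', ' CIRCLE',
--         ' PL', ' PLACE', ' TER', ' TERRACE', ' PKWY', ' PARKWAY',
--     ]
--     text_upper = text.upper()
--     for suffix in street_suffixes: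
--         if suffix in text_upper:
--             return True
--     return False
-- ===== SOURCE B (Python) =====
-- _SUFFIX_WORDS = tuple(
--     'ST AVE DR CT RD LN WAY BLVD CIR '
--     'STREET AVENUE DRIVE COURT ROAD LANE CIRCLE '
--     'PL PLACE TER TERRACE PKWY PARKWAY'.split()
-- )
--
--
-- def _has_address_pattern(text: str) -> bool:
--     """Check if text contains what looks like a street address."""
--     t = text.upper()
--     return any(t.startswith(_SUFFIX_WORDS, i + 1)
--                for i, ch in enumerate(t) if ch == ' ')
-- ===== Notes on version B (the rewrite author's own statement) =====
-- stated objective: alternative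
-- what changed: A runs 22 independent substring scans over the uppercased text (one 'suffix in text' per literal); B makes a single pass with enumerate over the uppercased text and, only at each space character, tests the following characters against a tuple of suffix words via str.startswith with a start index.
import Mathlib
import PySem

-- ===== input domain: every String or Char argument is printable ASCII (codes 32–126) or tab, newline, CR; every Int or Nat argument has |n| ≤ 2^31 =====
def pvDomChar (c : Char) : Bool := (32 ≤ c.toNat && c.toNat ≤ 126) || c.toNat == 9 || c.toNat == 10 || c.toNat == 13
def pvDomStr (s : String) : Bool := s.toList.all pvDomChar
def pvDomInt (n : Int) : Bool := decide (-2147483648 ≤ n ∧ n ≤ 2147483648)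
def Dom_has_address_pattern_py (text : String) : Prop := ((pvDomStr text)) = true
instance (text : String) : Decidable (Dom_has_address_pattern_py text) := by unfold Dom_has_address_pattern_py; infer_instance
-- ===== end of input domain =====

-- B replaces A's 22 independent substring scans by one pass over enumerate(text.upper()):
-- at each space character it tests the following characters against the suffix-word tuple
-- (objective: alternative; return value only, no side effects).


-- ===== PORT A =====
-- the literal list of street suffixes from A
def streetSuffixes : List String :=
  [" ST", " AVE", " DR", " CT", " RD", " LN", " WAY", " BLVD", " CIR",
   " STREET", " AVENUE", " DRIVE", " COURT", " ROAD", " LANE", " CIRCLE",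
   " PL", " PLACE", " TER", " TERRACE", " PKWY", " PARKWAY"]

-- the 'for suffix in street_suffixes: if suffix in text_upper: return True' loop
def loopA (ss : List String) (tu : String) : Bool :=
  match ss with
  | [] => false
  | s :: rest => if PySem.Str.isIn s tu then true else loopA rest tu

def has_address_pattern_py (text : String) : Bool :=
  loopA streetSuffixes (PySem.Str.upper text)

-- ===== PORT B =====
-- B's _SUFFIX_WORDS = tuple('ST AVE …'.split())
def suffixWords : List (List Char) :=
  PySem.Chars.split₀
    ("ST AVE DR CT RD LN WAY BLVD CIR STREET AVENUE DRIVE COURT ROAD LANE CIRCLE PL PLACE TER TERRACE PKWY PARKWAY").toList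

-- any(t.startswith(_SUFFIX_WORDS, i + 1) for i, ch in enumerate(t) if ch == ' ');
-- t.startswith(words, i + 1) with 0 ≤ i + 1 is exactly 'some word is a prefix of t[i+1:]',
-- ported as startswith on (drop (i+1).toNat) — exact since i ≥ 0 here.
def has_address_pattern_py_alt (text : String) : Bool :=
  let t := (PySem.Str.upper text).toList
  ((PySem.List.enumerate t 0).filter (fun p => p.2 == ' ')).any
    (fun p => suffixWords.any (fun w => PySem.Chars.startswith (t.drop (p.1 + 1).toNat) w))

-- ===== PRECONDITION & SPEC =====
def Spec_has_address_pattern_py (text : String) (out : Bool) : Prop := out = has_address_pattern_py_alt text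
instance (text : String) (out : Bool) : Decidable (Spec_has_address_pattern_py text out) := by unfold Spec_has_address_pattern_py; infer_instance

-- ===== CLAIM (what is proved, stated in full; the proofs are below) =====
def Claim_equal_has_address_pattern_py : Prop := ∀ (text : String), Dom_has_address_pattern_py text → Spec_has_address_pattern_py text (has_address_pattern_py text)

-- ===== LEMMAS AND PROOFS =====

-- A's loop is an existence test over the suffix list
theorem loopA_iff (ss : List String) (tu : String) :
    loopA ss tu = true ↔ ∃ s ∈ ss, PySem.Str.isIn s tu = true := by
  induction ss with
  | nil => simp [loopA]
  | cons s rest ih =>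
    cases h : PySem.Chars.isIn s.toList tu.toList
    · simp [loopA, PySem.Str.isIn_eq, h, ih]
    · simp [loopA, PySem.Str.isIn_eq, h]

-- the word list B builds at import time, evaluated
theorem suffixWords_eq :
    suffixWords =
      ["ST".toList, "AVE".toList, "DR".toList, "CT".toList, "RD".toList, "LN".toList,
       "WAY".toList, "BLVD".toList, "CIR".toList, "STREET".toList, "AVENUE".toList,
       "DRIVE".toList, "COURT".toList, "ROAD".toList, "LANE".toList, "CIRCLE".toList,
       "PL".toList, "PLACE".toList, "TER".toList, "TERRACE".toList, "PKWY".toList,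
       "PARKWAY".toList] := by decide

-- '" "++w in t' is 'some space position is followed by w'
theorem isIn_space_cons_iff (w t : List Char) :
    PySem.Chars.isIn (' ' :: w) t = true ↔
      ∃ k, ∃ _ : k < t.length, t[k] = ' ' ∧ w <+: t.drop (k + 1) := by
  rw [← PySem.Chars.exists_prefix_drop_iff_isIn]
  constructor
  · rintro ⟨j, hp⟩
    have hj : j < t.length := by
      by_contra h
      rw [List.drop_eq_nil_of_le (le_of_not_gt h)] at hp
      exact absurd (List.prefix_nil.mp hp) (by simp)
    rw [List.drop_eq_getElem_cons hj, List.cons_prefix_cons] at hp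
    exact ⟨j, hj, hp.1.symm, hp.2⟩
  · rintro ⟨k, hk, hsp, hp⟩
    refine ⟨k, ?_⟩
    rw [List.drop_eq_getElem_cons hk, hsp, List.cons_prefix_cons]
    exact ⟨rfl, hp⟩

-- B's filtered-enumerate pass is the same existence statement
theorem altPass_iff (ws : List (List Char)) (t : List Char) :
    (((PySem.List.enumerate t 0).filter (fun p => p.2 == ' ')).any
      (fun p => ws.any (fun w => PySem.Chars.startswith (t.drop (p.1 + 1).toNat) w)) = true) ↔
      ∃ w ∈ ws, ∃ k, ∃ _ : k < t.length, t[k] = ' ' ∧ w <+: t.drop (k + 1) := by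
  simp only [List.any_eq_true, List.mem_filter, PySem.List.mem_enumerate_iff,
    PySem.Chars.startswith_iff]
  constructor
  · rintro ⟨p, ⟨⟨k, hk, rfl⟩, hsp⟩, w, hw, hpre⟩
    refine ⟨w, hw, k, hk, by simpa using hsp, ?_⟩
    simpa using hpre
  · rintro ⟨w, hw, k, hk, hsp, hpre⟩
    exact ⟨(0 + (k : Int), t[k]), ⟨⟨k, hk, rfl⟩, by simpa using hsp⟩, w, hw, by simpa using hpre⟩

-- ===== VERDICT (by name: the statement is the Claim_ definition above) =====
theorem has_address_pattern_py_spec : Claim_equal_has_address_pattern_py := by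
  intro text _
  unfold Spec_has_address_pattern_py has_address_pattern_py has_address_pattern_py_alt
  rw [Bool.eq_iff_iff, loopA_iff, altPass_iff]
  simp only [PySem.Str.isIn_eq, suffixWords_eq, streetSuffixes, List.mem_cons,
    List.not_mem_nil, or_false, exists_eq_or_imp, exists_eq_left,
    show (" ST").toList = ' ' :: "ST".toList from rfl,
    show (" AVE").toList = ' ' :: "AVE".toList from rfl,
    show (" DR").toList = ' ' :: "DR".toList from rfl,
    show (" CT").toList = ' ' :: "CT".toList from rfl,
    show (" RD").toList = ' ' :: "RD".toList from rfl,
    show (" LN").toList = ' ' :: "LN".toList from rfl,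
    show (" WAY").toList = ' ' :: "WAY".toList from rfl,
    show (" BLVD").toList = ' ' :: "BLVD".toList from rfl,
    show (" CIR").toList = ' ' :: "CIR".toList from rfl,
    show (" STREET").toList = ' ' :: "STREET".toList from rfl,
    show (" AVENUE").toList = ' ' :: "AVENUE".toList from rfl,
    show (" DRIVE").toList = ' ' :: "DRIVE".toList from rfl,
    show (" COURT").toList = ' ' :: "COURT".toList from rfl,
    show (" ROAD").toList = ' ' :: "ROAD".toList from rfl,
    show (" LANE").toList = ' ' :: "LANE".toList from rfl,
    show (" CIRCLE").toList = ' ' :: "CIRCLE".toList from rfl,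
    show (" PL").toList = ' ' :: "PL".toList from rfl,
    show (" PLACE").toList = ' ' :: "PLACE".toList from rfl,
    show (" TER").toList = ' ' :: "TER".toList from rfl,
    show (" TERRACE").toList = ' ' :: "TERRACE".toList from rfl,
    show (" PKWY").toList = ' ' :: "PKWY".toList from rfl,
    show (" PARKWAY").toList = ' ' :: "PARKWAY".toList from rfl,
    isIn_space_cons_iff]
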